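-- pv_equiv track=rewrite | github.com/pdxdave/python-problems | 02_problem_solving/demos/main.py | emotify
-- ===== SOURCE A (Python) =====
-- def emotify(txt):
--
--     data = {
--         "smile": ":)",
--         "grin": ":D",
--         "sad": ":(",
--         "mad": ":/"
--     }
--
--     for k, v in data.items():
--         txt = txt.replace(k, v)
--
--     return txt
-- ===== SOURCE B (Python) =====
-- def emotify(txt):
--     pairs = (("smile", ":)"), ("grin", ":D"), ("sad", ":("), ("mad", ":/"))
--     out = []
--     i = 0
--     n = len(txt)
--     while i < n:
--         for k, v in pairs:
--             if txt.startswith(k, i):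
--                 out.append(v)
--                 i += len(k)
--                 break
--         else:
--             out.append(txt[i])
--             i += 1
--     return "".join(out)
-- ===== Notes on version B (the rewrite author's own statement) =====
-- stated objective: alternative
-- what changed: Replaces four successive full-string .replace passes by a single left-to-right scan that matches the four keywords at each position and copies or substitutes as it goes.
import Mathlib
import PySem

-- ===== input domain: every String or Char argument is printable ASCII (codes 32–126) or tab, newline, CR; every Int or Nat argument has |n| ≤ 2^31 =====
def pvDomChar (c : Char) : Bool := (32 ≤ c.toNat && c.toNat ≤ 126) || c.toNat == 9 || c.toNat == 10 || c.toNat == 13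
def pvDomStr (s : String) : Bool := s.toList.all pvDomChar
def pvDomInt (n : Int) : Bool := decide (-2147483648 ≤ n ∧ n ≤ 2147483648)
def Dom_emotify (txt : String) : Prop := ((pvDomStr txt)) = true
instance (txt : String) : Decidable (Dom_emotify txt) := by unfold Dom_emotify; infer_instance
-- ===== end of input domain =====

-- B replaces A's four successive full-string .replace passes by a single left-to-right
-- scan substituting each keyword as it is met (objective: alternative, same cost).

-- ===== PORT A =====
-- A: txt = txt.replace(k, v) for (k, v) in {"smile": ":)", "grin": ":D", "sad": ":(", "mad": ":/"}.items()
def emotify (txt : String) : String :=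
  let t1 := PySem.Str.replace txt "smile" ":)"
  let t2 := PySem.Str.replace t1 "grin" ":D"
  let t3 := PySem.Str.replace t2 "sad" ":("
  PySem.Str.replace t3 "mad" ":/"

-- ===== PORT B =====
-- B's while loop over index i, with the inner for over the four (keyword, emoticon) pairs
-- trying txt.startswith(k, i); the remaining suffix txt[i:] is the recursion argument.
def scanB : List Char → List Char
  | [] => []
  | c :: t =>
    if ['s','m','i','l','e'].isPrefixOf (c :: t) then ':' :: ')' :: scanB (t.drop 4)
    else if ['g','r','i','n'].isPrefixOf (c :: t) then ':' :: 'D' :: scanB (t.drop 3)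
    else if ['s','a','d'].isPrefixOf (c :: t) then ':' :: '(' :: scanB (t.drop 2)
    else if ['m','a','d'].isPrefixOf (c :: t) then ':' :: '/' :: scanB (t.drop 2)
    else c :: scanB t
termination_by l => l.length
decreasing_by all_goals simp

def emotify_alt (txt : String) : String := String.ofList (scanB txt.toList)

-- ===== PRECONDITION & SPEC =====
def Spec_emotify (txt : String) (out : String) : Prop := out = emotify_alt txt
instance (txt : String) (out : String) : Decidable (Spec_emotify txt out) := by unfold Spec_emotify; infer_instance

-- ===== CLAIM (what is proved, stated in full; the proofs are below) =====
def Claim_equal_emotify : Prop := ∀ (txt : String), Dom_emotify txt → Spec_emotify txt (emotify txt)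

-- ===== LEMMAS AND PROOFS =====

-- A clean structural-recursion form of PySem.Chars.replace for a nonempty pattern.
def repl (c0 : Char) (p new : List Char) : List Char → List Char
  | [] => []
  | c :: t =>
    if (c0 :: p).isPrefixOf (c :: t) then new ++ repl c0 p new (t.drop p.length)
    else c :: repl c0 p new t
termination_by l => l.length
decreasing_by all_goals simp

lemma go_eq_repl (c0 : Char) (p new : List Char) :
    ∀ (fuel : Nat) (l acc : List Char), l.length ≤ fuel →
      PySem.Chars.replace.go (c0 :: p) new fuel l acc = acc.reverse ++ repl c0 p new l := by
  intro fuel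
  induction fuel with
  | zero =>
    intro l acc h
    have hl : l = [] := by cases l <;> simp_all
    subst hl
    rw [PySem.Chars.replace.go.eq_def]
    simp [repl]
  | succ n ih =>
    intro l acc h
    cases l with
    | nil => rw [PySem.Chars.replace.go.eq_def]; simp [repl]
    | cons c t =>
      rw [PySem.Chars.replace.go.eq_def]
      simp only []
      by_cases hp : (c0 :: p).isPrefixOf (c :: t) = true
      · rw [if_pos hp, ih _ _ (by simp at h ⊢; omega), repl, if_pos hp]
        simp
      · rw [if_neg hp, ih _ _ (by simp at h; omega), repl, if_neg hp]
        simp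

lemma replace_eq_repl (l : List Char) (c0 : Char) (p new : List Char) :
    PySem.Chars.replace l (c0 :: p) new = repl c0 p new l := by
  unfold PySem.Chars.replace
  rw [if_neg (by simp), go_eq_repl c0 p new l.length l [] le_rfl]
  simp

-- If no character of q equals the pattern head c0 or the replacement head d, then
-- a prefix q of the replaced string was already a prefix of the original.
lemma repl_pass (c0 : Char) (p : List Char) (d : Char) (nd : List Char) :
    ∀ (q l : List Char), (∀ c ∈ q, c ≠ c0 ∧ c ≠ d) →
      q <+: repl c0 p (d :: nd) l → q <+: l := by
  intro q
  induction q with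
  | nil => simp
  | cons a q ih =>
    intro l hq hpre
    cases l with
    | nil => simp [repl] at hpre
    | cons c t =>
      have ha := hq a (by simp)
      rw [repl] at hpre
      split at hpre
      · simp only [List.cons_append, List.cons_prefix_cons] at hpre
        exact absurd hpre.1 ha.2
      · simp only [List.cons_prefix_cons] at hpre ⊢
        exact ⟨hpre.1, ih t (fun c hc => hq c (List.mem_cons_of_mem _ hc)) hpre.2⟩

lemma main_lemma : ∀ (n : Nat) (l : List Char), l.length ≤ n →
    repl 'm' ['a','d'] [':','/'] (repl 's' ['a','d'] [':','('] (repl 'g' ['r','i','n'] [':','D']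
      (repl 's' ['m','i','l','e'] [':',')'] l))) = scanB l := by
  intro n
  induction n with
  | zero =>
    intro l h
    have hl : l = [] := by cases l <;> simp_all
    subst hl
    simp [repl, scanB]
  | succ n ih =>
    intro l h
    cases l with
    | nil => simp [repl, scanB]
    | cons c t =>
      by_cases h1 : ['s','m','i','l','e'].isPrefixOf (c :: t) = true
      · obtain ⟨rest, hrest⟩ := List.isPrefixOf_iff_prefix.mp h1
        have hct : c :: t = 's'::'m'::'i'::'l'::'e'::rest := hrest.symm
        have hlen : rest.length ≤ n := by
          have h' := h; rw [hct] at h'; simp at h'; omega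
        rw [hct]
        simp [repl, scanB, List.isPrefixOf]
        exact ih rest hlen
      · by_cases h2 : ['g','r','i','n'].isPrefixOf (c :: t) = true
        · obtain ⟨rest, hrest⟩ := List.isPrefixOf_iff_prefix.mp h2
          have hct : c :: t = 'g'::'r'::'i'::'n'::rest := hrest.symm
          have hlen : rest.length ≤ n := by
            have h' := h; rw [hct] at h'; simp at h'; omega
          rw [hct]
          simp [repl, scanB, List.isPrefixOf]
          exact ih rest hlen
        · by_cases h3 : ['s','a','d'].isPrefixOf (c :: t) = true
          · obtain ⟨rest, hrest⟩ := List.isPrefixOf_iff_prefix.mp h3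
            have hct : c :: t = 's'::'a'::'d'::rest := hrest.symm
            have hlen : rest.length ≤ n := by
              have h' := h; rw [hct] at h'; simp at h'; omega
            rw [hct]
            simp [repl, scanB, List.isPrefixOf]
            exact ih rest hlen
          · by_cases h4 : ['m','a','d'].isPrefixOf (c :: t) = true
            · obtain ⟨rest, hrest⟩ := List.isPrefixOf_iff_prefix.mp h4
              have hct : c :: t = 'm'::'a'::'d'::rest := hrest.symm
              have hlen : rest.length ≤ n := by
                have h' := h; rw [hct] at h'; simp at h'; omega
              rw [hct]
              simp [repl, scanB, List.isPrefixOf]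
              exact ih rest hlen
            · -- no keyword matches at this position
              have hlen : t.length ≤ n := by simp at h; omega
              have e1 : repl 's' ['m','i','l','e'] [':',')'] (c :: t)
                  = c :: repl 's' ['m','i','l','e'] [':',')'] t := by
                rw [repl, if_neg h1]
              have hg : ¬ (['g','r','i','n'].isPrefixOf
                  (c :: repl 's' ['m','i','l','e'] [':',')'] t) = true) := by
                intro hcon
                simp only [List.isPrefixOf_iff_prefix, List.cons_prefix_cons] at hcon
                obtain ⟨hc, hrin⟩ := hcon
                have hq : ['r','i','n'] <+: t :=
                  repl_pass 's' ['m','i','l','e'] ':' [')'] ['r','i','n'] t (by simp) hrin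
                exact h2 (by
                  simp only [List.isPrefixOf_iff_prefix, List.cons_prefix_cons]
                  exact ⟨hc, hq⟩)
              have e2 : repl 'g' ['r','i','n'] [':','D']
                    (c :: repl 's' ['m','i','l','e'] [':',')'] t)
                  = c :: repl 'g' ['r','i','n'] [':','D']
                      (repl 's' ['m','i','l','e'] [':',')'] t) := by
                rw [repl, if_neg hg]
              have hs : ¬ (['s','a','d'].isPrefixOf
                  (c :: repl 'g' ['r','i','n'] [':','D']
                    (repl 's' ['m','i','l','e'] [':',')'] t)) = true) := by
                intro hcon
                simp only [List.isPrefixOf_iff_prefix, List.cons_prefix_cons] at hcon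
                obtain ⟨hc, had⟩ := hcon
                have hq1 : ['a','d'] <+: repl 's' ['m','i','l','e'] [':',')'] t :=
                  repl_pass 'g' ['r','i','n'] ':' ['D'] ['a','d'] _ (by simp) had
                have hq2 : ['a','d'] <+: t :=
                  repl_pass 's' ['m','i','l','e'] ':' [')'] ['a','d'] t (by simp) hq1
                exact h3 (by
                  simp only [List.isPrefixOf_iff_prefix, List.cons_prefix_cons]
                  exact ⟨hc, hq2⟩)
              have e3 : repl 's' ['a','d'] [':','(']
                    (c :: repl 'g' ['r','i','n'] [':','D']
                      (repl 's' ['m','i','l','e'] [':',')'] t))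
                  = c :: repl 's' ['a','d'] [':','(']
                      (repl 'g' ['r','i','n'] [':','D']
                        (repl 's' ['m','i','l','e'] [':',')'] t)) := by
                rw [repl, if_neg hs]
              have hm : ¬ (['m','a','d'].isPrefixOf
                  (c :: repl 's' ['a','d'] [':','(']
                    (repl 'g' ['r','i','n'] [':','D']
                      (repl 's' ['m','i','l','e'] [':',')'] t))) = true) := by
                intro hcon
                simp only [List.isPrefixOf_iff_prefix, List.cons_prefix_cons] at hcon
                obtain ⟨hc, had⟩ := hcon
                have hq1 := repl_pass 's' ['a','d'] ':' ['('] ['a','d'] _ (by simp) had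
                have hq2 := repl_pass 'g' ['r','i','n'] ':' ['D'] ['a','d'] _ (by simp) hq1
                have hq3 : ['a','d'] <+: t :=
                  repl_pass 's' ['m','i','l','e'] ':' [')'] ['a','d'] t (by simp) hq2
                exact h4 (by
                  simp only [List.isPrefixOf_iff_prefix, List.cons_prefix_cons]
                  exact ⟨hc, hq3⟩)
              have e4 : repl 'm' ['a','d'] [':','/']
                    (c :: repl 's' ['a','d'] [':','(']
                      (repl 'g' ['r','i','n'] [':','D']
                        (repl 's' ['m','i','l','e'] [':',')'] t)))
                  = c :: repl 'm' ['a','d'] [':','/']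
                      (repl 's' ['a','d'] [':','(']
                        (repl 'g' ['r','i','n'] [':','D']
                          (repl 's' ['m','i','l','e'] [':',')'] t))) := by
                rw [repl, if_neg hm]
              rw [e1, e2, e3, e4, scanB, if_neg h1, if_neg h2, if_neg h3, if_neg h4]
              exact congrArg (c :: ·) (ih t hlen)

-- ===== VERDICT (by name: the statement is the Claim_ definition above) =====
theorem emotify_spec : Claim_equal_emotify := by
  intro txt _
  unfold Spec_emotify emotify emotify_alt
  apply String.toList_inj.mp
  simp only [PySem.Str.toList_replace, String.toList_ofList]
  have hs : "smile".toList = ['s','m','i','l','e'] := rfl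
  have hg : "grin".toList = ['g','r','i','n'] := rfl
  have hd : "sad".toList = ['s','a','d'] := rfl
  have hm : "mad".toList = ['m','a','d'] := rfl
  have hv1 : ":)".toList = [':',')'] := rfl
  have hv2 : ":D".toList = [':','D'] := rfl
  have hv3 : ":(".toList = [':','('] := rfl
  have hv4 : ":/".toList = [':','/'] := rfl
  rw [hs, hg, hd, hm, hv1, hv2, hv3, hv4]
  simp only [replace_eq_repl]
  exact main_lemma txt.toList.length txt.toList le_rfl
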